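-- pv_equiv track=rewrite | github.com/sarishtshreshth0/plag_extract | Project_CodeNet_Python800/p03212/s048003661.py | check753
-- ===== SOURCE A (Python) =====
-- def check753(num):
--     three = False
--     five = False
--     seven = False
--     for s in num:
--         if s == "3":
--             three = True
--         elif s == "5":
--             five = True
--         elif s == "7":
--             seven = True
--         if three and five and seven:
--             return True
--     return False
-- ===== SOURCE B (Python) =====
-- def check753(num):
--     return "3" in num and "5" in num and "7" in num
-- ===== Notes on version B (the rewrite author's own statement) =====
-- stated objective: idiomatic
-- what changed: Replaces the flag-accumulating single-pass Python-level loop with early return by three independent short-circuiting substring membership tests, one per required digit, with no mutable state.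
import Mathlib
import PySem

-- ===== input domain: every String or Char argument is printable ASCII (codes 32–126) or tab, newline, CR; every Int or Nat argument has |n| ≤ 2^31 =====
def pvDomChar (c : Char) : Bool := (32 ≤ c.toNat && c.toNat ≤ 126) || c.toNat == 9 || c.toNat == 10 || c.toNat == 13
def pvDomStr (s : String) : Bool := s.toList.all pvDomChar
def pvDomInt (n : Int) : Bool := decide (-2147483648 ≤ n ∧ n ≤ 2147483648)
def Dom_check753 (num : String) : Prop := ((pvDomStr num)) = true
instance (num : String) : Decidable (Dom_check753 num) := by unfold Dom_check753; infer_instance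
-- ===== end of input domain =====

-- B replaces A's stateful single-pass loop with early return by three independent membership tests (idiomatic, same cost).

-- ===== PORT A =====
-- literal port of A's loop: three flags, elif chain, early return when all are set
def check753Loop : List Char → Bool → Bool → Bool → Bool
  | [], _, _, _ => false
  | s :: rest, three, five, seven =>
    let three := if s = '3' then true else three
    let five := if s ≠ '3' ∧ s = '5' then true else five
    let seven := if s ≠ '3' ∧ s ≠ '5' ∧ s = '7' then true else seven
    if three && five && seven then true else check753Loop rest three five seven


def check753 (num : String) : Bool := check753Loop num.toList false false false

-- ===== PORT B =====
def check753_alt (num : String) : Bool :=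
  num.toList.contains '3' && num.toList.contains '5' && num.toList.contains '7'

-- ===== PRECONDITION & SPEC =====
def Spec_check753 (num : String) (out : Bool) : Prop := out = check753_alt num
instance (num : String) (out : Bool) : Decidable (Spec_check753 num out) := by unfold Spec_check753; infer_instance

-- ===== CLAIM (what is proved, stated in full; the proofs are below) =====
def Claim_equal_check753 : Prop := ∀ (num : String), Dom_check753 num → Spec_check753 num (check753 num)

-- ===== LEMMAS AND PROOFS =====

theorem check753Loop_char (l : List Char) (t f v : Bool) (h : (t && f && v) = false) :
    check753Loop l t f v =
      ((t || l.contains '3') && (f || l.contains '5') && (v || l.contains '7')) := by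
  induction l generalizing t f v with
  | nil => cases t <;> cases f <;> cases v <;> simp_all [check753Loop]
  | cons c rest ih =>
    simp only [check753Loop]
    have e3 : ((if c = '3' then true else t) || rest.contains '3') = (t || (c :: rest).contains '3') := by
      by_cases h3 : c = '3'
      · simp [h3]
      · simp [h3, Ne.symm h3]
    have e5 : ((if c ≠ '3' ∧ c = '5' then true else f) || rest.contains '5') = (f || (c :: rest).contains '5') := by
      by_cases h5 : c = '5'
      · subst h5; simp
      · simp [h5, Ne.symm h5]
    have e7 : ((if c ≠ '3' ∧ c ≠ '5' ∧ c = '7' then true else v) || rest.contains '7') = (v || (c :: rest).contains '7') := by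
      by_cases h7 : c = '7'
      · subst h7; simp
      · simp [h7, Ne.symm h7]
    by_cases hall : ((if c = '3' then true else t) && (if c ≠ '3' ∧ c = '5' then true else f) &&
        (if c ≠ '3' ∧ c ≠ '5' ∧ c = '7' then true else v)) = true
    · rw [if_pos hall]
      rw [← e3, ← e5, ← e7]
      simp only [Bool.and_eq_true] at hall
      simp [hall.1.1, hall.1.2, hall.2]
    · rw [if_neg (by simpa using hall), ih _ _ _ (by simpa using hall), e3, e5, e7]

-- ===== VERDICT (by name: the statement is the Claim_ definition above) =====
theorem check753_spec : Claim_equal_check753 := by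
  intro num _
  unfold Spec_check753 check753 check753_alt
  rw [check753Loop_char _ false false false rfl]
  simp
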